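-- pv_equiv track=rewrite | github.com/AT190510-Cuong/ThuatToanATTT | cuoi_ky/phan_2/cau_37.py | failure_function
-- ===== SOURCE A (Python) =====
-- def failure_function(P):
--     F=[-1,0]
--     for j in range(2,len(P)):
--         d=0
--         t=1
--         i=j-1
--         x=j
--         while(t<j):
--             if P[0:t]==P[i:x]:
--                 d+=1
--             t+=1
--             i-=1
--         F.append(d)
--     return F
-- ===== SOURCE B (Python) =====
-- def failure_function(P):
--     F = [-1, 0]
--     borders = []  # increasing list of proper-border lengths of the current prefix
--     for j in range(2, len(P)):
--         c = P[j - 1]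
--         nb = [1] if P[0] == c else []
--         for t in borders:
--             if P[t] == c:
--                 nb.append(t + 1)
--         borders = nb
--         F.append(len(borders))
--     return F
-- ===== Notes on version B (the rewrite author's own statement) =====
-- stated objective: faster
-- what changed: Instead of re-comparing every prefix/suffix slice pair for each prefix (A), B incrementally maintains the list of border lengths of the current prefix, extending each border by one matching character per step, so no slice comparison is ever made.
import Mathlib
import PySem

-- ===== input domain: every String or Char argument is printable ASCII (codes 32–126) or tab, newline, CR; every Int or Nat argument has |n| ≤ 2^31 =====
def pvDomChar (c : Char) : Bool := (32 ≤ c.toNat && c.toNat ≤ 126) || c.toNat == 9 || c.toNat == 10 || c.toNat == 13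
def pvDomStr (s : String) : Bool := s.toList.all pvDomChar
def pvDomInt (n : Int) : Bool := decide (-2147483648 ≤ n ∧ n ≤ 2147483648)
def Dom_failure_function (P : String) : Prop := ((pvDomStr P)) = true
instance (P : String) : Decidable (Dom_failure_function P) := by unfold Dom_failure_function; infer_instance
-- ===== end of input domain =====

-- B replaces A's per-prefix re-comparison of all prefix/suffix slices by incremental
-- maintenance of the border-length list (objective: faster; no slice comparisons).

-- ===== PORT A =====
-- inner 'while t < j' loop of A; fuel bounds the iteration count, the 't < j' test is A's
def aWhile (P : String) (j d t i x : Int) : Nat → Int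
  | 0 => d
  | Nat.succ f =>
    if t < j then
      aWhile P j
        (if PySem.Str.slice P (some 0) (some t) == PySem.Str.slice P (some i) (some x)
         then d + 1 else d)
        (t + 1) (i - 1) x f
    else d

def failure_function (P : String) : List Int :=
  (PySem.List.pyRange 2 (PySem.Str.len P) 1).foldl
    (fun F j => F ++ [aWhile P j 0 1 (j - 1) j j.toNat]) [-1, 0]

-- ===== PORT B =====
def bStep (P : String) (st : List Int × List Int) (j : Int) : List Int × List Int :=
  let c := PySem.Str.pyGet? P (j - 1)
  let nb0 : List Int := if PySem.Str.pyGet? P 0 == c then [1] else []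
  let nb := st.2.foldl (fun acc t => if PySem.Str.pyGet? P t == c then acc ++ [t + 1] else acc) nb0
  (st.1 ++ [(nb.length : Int)], nb)

def failure_function_alt (P : String) : List Int :=
  ((PySem.List.pyRange 2 (PySem.Str.len P) 1).foldl (bStep P) ([-1, 0], [])).1

-- ===== PRECONDITION & SPEC =====
def Spec_failure_function (P : String) (out : List Int) : Prop := out = failure_function_alt P
instance (P : String) (out : List Int) : Decidable (Spec_failure_function P out) := by unfold Spec_failure_function; infer_instance

-- ===== CLAIM (what is proved, stated in full; the proofs are below) =====
def Claim_equal_failure_function : Prop := ∀ (P : String), Dom_failure_function P → Spec_failure_function P (failure_function P)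

-- ===== LEMMAS AND PROOFS =====

-- border predicate exactly as A's slice comparison writes it (i = j - t, x = j)
def bp (P : String) (j t : Int) : Bool :=
  PySem.Str.slice P (some 0) (some t) == PySem.Str.slice P (some (j - t)) (some j)

-- the (increasing) list of proper-border lengths of the prefix of length j
def sB (P : String) (j : Int) : List Int :=
  (PySem.List.pyRange 1 j 1).filter (bp P j)

-- natural-number versions used by the induction
def borderN (l : List Char) (j t : Nat) : Bool := decide (l.take t = (l.drop (j - t)).take t)

def sN (l : List Char) (j : Nat) : List Nat := (List.range' 1 (j - 1)).filter (borderN l j)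

def nc (t : Nat) : Int := (t : Int)

-- A's inner loop counts bp over t = t0 .. j-1
lemma aWhile_count (P : String) (j : Int) : ∀ (fuel : Nat) (t d : Int),
    (j - t).toNat ≤ fuel →
    aWhile P j d t (j - t) j fuel = d + ((PySem.List.pyRange t j 1).countP (bp P j) : Int) := by
  intro fuel
  induction fuel with
  | zero =>
    intro t d h
    rw [aWhile, PySem.List.pyRange_one_eq_nil (by omega)]
    simp
  | succ f ih =>
    intro t d h
    rw [aWhile]
    by_cases hlt : t < j
    · simp only [if_pos hlt]
      have e : j - t - 1 = j - (t + 1) := by ring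
      rw [e, ih (t + 1) _ (by omega), PySem.List.pyRange_one_cons hlt, List.countP_cons]
      simp only [bp]
      split_ifs <;> push_cast <;> ring
    · simp only [if_neg hlt]
      rw [PySem.List.pyRange_one_eq_nil (by omega)]
      simp

-- list-level core fact: a border of length t is a border of length t-1 plus one matching character
lemma core (l : List Char) (t j : Nat) (ht : 1 ≤ t) (htj : t < j) (hj : j ≤ l.length) :
    (l.take t = (l.drop (j - t)).take t) ↔
      (l.take (t - 1) = (l.drop (j - t)).take (t - 1)) ∧ l[t - 1]? = l[j - 1]? := by
  obtain ⟨t, rfl⟩ : ∃ t', t = t' + 1 := ⟨t - 1, by omega⟩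
  have h1 : t < l.length := by omega
  have h2 : j - 1 < l.length := by omega
  rw [List.take_add_one, List.take_add_one, List.getElem?_drop,
      show j - (t + 1) + t = j - 1 from by omega]
  simp only [Nat.add_sub_cancel]
  rw [List.getElem?_eq_getElem h1, List.getElem?_eq_getElem h2]
  simp only [Option.toList_some]
  constructor
  · intro h
    have hi := List.append_inj h (by
      rw [List.length_take, List.length_take]
      simp [List.length_drop]
      omega)
    exact ⟨hi.1, by simpa using hi.2⟩
  · rintro ⟨h, h'⟩
    simp only [Option.some_inj] at h'
    rw [h, h']

-- Option Char equality test is propositional equality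
lemma obeq (a b : Option Char) : (a == b) = decide (a = b) := by
  rw [Bool.eq_iff_iff]
  simp

lemma bp_natCast (P : String) (j t : Nat) (htj : t ≤ j) :
    bp P (j : Int) (t : Int) = borderN P.toList j t := by
  have e : ((j : Int) - (t : Int)) = ((j - t : Nat) : Int) := by omega
  unfold bp
  rw [e]
  have hb : ∀ s u : String, (s == u) = decide (s.toList = u.toList) := by
    intro s u
    show decide (s = u) = _
    exact decide_eq_decide.mpr String.toList_inj.symm
  rw [hb]
  rw [PySem.Str.toList_slice, PySem.Str.toList_slice, PySem.Chars.slice_eq_listSlice,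
      PySem.Chars.slice_eq_listSlice, PySem.List.slice_zero_start, PySem.List.slice_to_natCast,
      PySem.List.slice_natCast, show j - (j - t) = t from by omega]
  rfl

lemma sB_natCast (P : String) (j : Nat) :
    sB P (j : Int) = List.map nc (sN P.toList j) := by
  unfold sB sN
  rw [PySem.List.pyRange_one, show ((j : Int) - 1).toNat = j - 1 from by omega,
      List.range'_eq_map_range]
  rw [List.filter_map, List.filter_map, List.map_map]
  have hf : ∀ k ∈ List.range (j - 1),
      (bp P (j : Int) ∘ fun k : Nat => 1 + (k : Int)) k = ((borderN P.toList j) ∘ (1 + ·)) k := by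
    intro k hk
    rw [List.mem_range] at hk
    show bp P (j : Int) (1 + (k : Int)) = borderN P.toList j (1 + k)
    rw [show (1 + (k : Int)) = ((1 + k : Nat) : Int) from by push_cast; ring]
    exact bp_natCast P j (1 + k) (by omega)
  rw [List.filter_congr hf]
  apply List.map_congr_left
  intro k _
  show 1 + (k : Int) = nc (1 + k)
  unfold nc
  push_cast
  ring

-- B's step recurrence on border lists, natural level
lemma sN_succ (l : List Char) (j : Nat) (h2 : 2 ≤ j) (hn : j ≤ l.length) :
    sN l j = (if l[0]? = l[j - 1]? then [1] else []) ++
      ((sN l (j - 1)).filter (fun t => decide (l[t]? = l[j - 1]?))).map (· + 1) := by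
  have h1 : borderN l j 1 = decide (l[0]? = l[j - 1]?) := by
    unfold borderN
    have := core l 1 j (by omega) (by omega) hn
    simp only [Nat.sub_self, List.take_zero] at this
    simp [this]
  have lhs_eq : sN l j =
      (if borderN l j 1 then [1] else []) ++ (List.range' 2 (j - 2)).filter (borderN l j) := by
    unfold sN
    rw [show j - 1 = (j - 2) + 1 from by omega, List.range'_succ, List.filter_cons]
    norm_num
    split_ifs <;> simp
  have hmap : List.range' 2 (j - 2) = (List.range' 1 (j - 2)).map (· + 1) := by
    have := List.map_add_range' (a := 1) (s := 1) (n := j - 2) (step := 1)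
    simp only [Nat.reduceAdd] at this ⊢
    rw [← this]
    apply List.map_congr_left
    intro k _
    ring
  have hrest : (List.range' 1 (j - 2)).filter (borderN l j ∘ (· + 1)) =
      (sN l (j - 1)).filter (fun t => decide (l[t]? = l[j - 1]?)) := by
    unfold sN
    rw [show j - 1 - 1 = j - 2 from by omega, List.filter_filter]
    apply List.filter_congr
    intro t ht
    rw [List.mem_range'_1] at ht
    have hcore := core l (t + 1) j (by omega) (by omega) hn
    simp only [Nat.add_sub_cancel] at hcore
    show borderN l j (t + 1) = _
    unfold borderN
    rw [show (j - 1) - t = j - (t + 1) from by omega]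
    rw [Bool.eq_iff_iff, Bool.and_eq_true]
    simp only [decide_eq_true_eq]
    rw [hcore]
    tauto
  rw [lhs_eq, hmap, List.filter_map, hrest, h1]
  simp

-- bStep sends the borders of prefix j-1 to those of prefix j
lemma bStep_spec (P : String) (F : List Int) (j : Nat) (h2 : 2 ≤ j)
    (hn : j ≤ P.toList.length) :
    bStep P (F, sB P ((j : Int) - 1)) (j : Int) =
      (F ++ [((sB P (j : Int)).length : Int)], sB P (j : Int)) := by
  have e : ((j : Int) - 1) = ((j - 1 : Nat) : Int) := by omega
  unfold bStep
  dsimp only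
  rw [e, sB_natCast, sB_natCast, PySem.Str.pyGet?_natCast,
      show (0 : Int) = ((0 : Nat) : Int) from rfl, PySem.Str.pyGet?_natCast]
  rw [PySem.List.foldl_append_if (fun t => PySem.Str.pyGet? P t == P.toList[j - 1]?)
        (fun t => t + 1)]
  rw [List.filter_map, List.map_map]
  have hp : ∀ t ∈ sN P.toList (j - 1),
      ((fun t => PySem.Str.pyGet? P t == P.toList[j - 1]?) ∘ nc) t =
        (fun t => decide (P.toList[t]? = P.toList[j - 1]?)) t := by
    intro t _
    show (PySem.Str.pyGet? P ((t : Nat) : Int) == _) = _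
    rw [PySem.Str.pyGet?_natCast, obeq]
  rw [List.filter_congr hp]
  have hm : ((sN P.toList (j - 1)).filter (fun t => decide (P.toList[t]? = P.toList[j - 1]?))).map
        ((fun t => t + 1) ∘ nc)
      = List.map nc (((sN P.toList (j - 1)).filter
          (fun t => decide (P.toList[t]? = P.toList[j - 1]?))).map (· + 1)) := by
    rw [List.map_map]
    apply List.map_congr_left
    intro t _
    show (t : Int) + 1 = nc (t + 1)
    unfold nc
    push_cast
    ring
  have h0 : (if (P.toList[0]? == P.toList[j - 1]?) = true then [(1 : Int)] else []) =
      List.map nc (if P.toList[0]? = P.toList[j - 1]? then [1] else []) := by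
    rw [obeq]
    by_cases h : P.toList[0]? = P.toList[j - 1]? <;> simp [h, nc]
  rw [hm, h0, ← List.map_append, ← sN_succ P.toList j h2 hn]

lemma bOuter (P : String) : ∀ (k : Nat),
    (2 + (k : Int)) ≤ (P.toList.length : Int) →
    (PySem.List.pyRange 2 (2 + (k : Int)) 1).foldl (bStep P) ([-1, 0], []) =
      ([-1, 0] ++ (PySem.List.pyRange 2 (2 + (k : Int)) 1).map
          (fun j => ((sB P j).length : Int)),
        sB P (2 + (k : Int) - 1)) := by
  intro k
  induction k with
  | zero =>
    intro _
    rw [show (2 + ((0 : Nat) : Int)) = 2 from by norm_num]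
    rw [PySem.List.pyRange_one_eq_nil (le_refl 2)]
    simp only [List.foldl_nil, List.map_nil, List.append_nil]
    rw [show (2 : Int) - 1 = 1 from by ring]
    unfold sB
    rw [PySem.List.pyRange_one_eq_nil (le_refl 1)]
    simp
  | succ k ih =>
    intro h
    have e : (2 + ((k + 1 : Nat) : Int)) = (2 + (k : Int)) + 1 := by push_cast; ring
    rw [e, PySem.List.pyRange_one_succ_right (by omega), List.foldl_append, List.map_append,
        ih (by omega)]
    simp only [List.foldl_cons, List.foldl_nil]
    have hj : ((2 + k : Nat) : Int) = 2 + (k : Int) := by push_cast; ring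
    have hb := bStep_spec P ([-1, 0] ++ (PySem.List.pyRange 2 (2 + (k : Int)) 1).map
          (fun j => ((sB P j).length : Int))) (2 + k) (by omega) (by omega)
    rw [hj] at hb
    rw [hb]
    rw [show (2 + (k : Int)) + 1 - 1 = 2 + (k : Int) from by ring]
    simp

-- ===== VERDICT (by name: the statement is the Claim_ definition above) =====
theorem failure_function_spec : Claim_equal_failure_function := by
  intro P _
  unfold Spec_failure_function failure_function failure_function_alt
  have hlen : PySem.Str.len P = (P.toList.length : Int) := by
    simp [PySem.Str.len_eq]
  rw [hlen]
  by_cases hn2 : P.toList.length < 2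
  · rw [PySem.List.pyRange_one_eq_nil (by omega)]
    simp
  · obtain ⟨k, hk⟩ : ∃ k : Nat, P.toList.length = 2 + k := ⟨P.toList.length - 2, by omega⟩
    have hcast : ((P.toList.length : Int)) = 2 + (k : Int) := by rw [hk]; push_cast; ring
    rw [hcast]
    rw [PySem.List.foldl_append_singleton_eq_map, bOuter P k (by omega)]
    congr 1
    apply List.map_congr_left
    intro j hj
    rw [PySem.List.mem_pyRange_one] at hj
    have h := aWhile_count P j j.toNat 1 0 (by omega)
    rw [h, List.countP_eq_length_filter]
    simp [sB]
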